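-- pv_equiv track=rewrite | github.com/Zhou-London/comp0009 | src/tableau.py | check_closed
-- ===== SOURCE A (Python) =====
-- def is_prop_atom(fmla: str) -> bool:
--     return fmla in ['p','q','r','s']
--
-- def is_pred_atom(fmla: str) -> bool:
--     if len(fmla) < 4:
--         return False
--     if not fmla[0].isupper() or fmla[1] != '(' or fmla[-1] != ')':
--         return False
--
--     args = fmla[2:-1]
--     if not args:
--         return False
--
--     parts = args.split(',')
--     return all(len(p) == 1 and p.islower() for p in parts)
--
-- def split_binary(fmla: str) -> tuple[str,str,str]:
--     if len(fmla) < 5 or fmla[0] != '(' or fmla[-1] != ')':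
--         return None
--     level = 0
--     i = 0
--     while i < len(fmla):
--         ch = fmla[i]
--         if ch == '(':
--             level += 1
--         elif ch == ')':
--             level -= 1
--         elif level == 1:
--             if fmla.startswith('->', i):
--                 return (fmla[1:i], '->', fmla[i+2:-1])
--             if fmla.startswith('\\/', i):
--                 return (fmla[1:i], '\\/', fmla[i+2:-1])
--             if ch == '&':
--                 return (fmla[1:i], '&', fmla[i+1:-1])
--         i += 1
--     return None
--
-- def parse_prop(fmla: str) -> int:
--     if is_prop_atom(fmla):
--         return 6
--     if fmla.startswith('~'):
--         inner = parse_prop(fmla[1:])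
--         if inner:
--             return 7
--         return 0
--     parts = split_binary(fmla)
--     if parts:
--         left,right = parts[0],parts[2]
--         if parse_prop(left) and parse_prop(right):
--             return 8
--     return 0
--
-- def parse_fol(fmla: str) -> int:
--     if is_pred_atom(fmla):
--         return 1
--     if fmla.startswith('~'):
--         inner = parse_fol(fmla[1:])
--         if inner:
--             return 2
--         return 0
--     if len(fmla) >= 2 and fmla[0] in ['A','E'] and fmla[1].islower():
--         rest = fmla[2:]
--         if not rest:
--             return 0
--         if parse_fol(rest):
--             return 3 if fmla[0] == 'A' else 4
--     parts = split_binary(fmla)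
--     if parts:
--         left,right = parts[0],parts[2]
--         if parse_fol(left) and parse_fol(right):
--             return 5
--     return 0
--
-- def is_literal(fmla: str) -> bool:
--     if parse_prop(fmla) == 6 or parse_fol(fmla) == 1:
--         return True
--     if fmla.startswith('~'):
--         inner = fmla[1:]
--         return parse_prop(inner) == 6 or parse_fol(inner) == 1
--     return False
--
-- def check_closed(formulas: list[str]) -> tuple[bool, set[str]]:
--     literals = set()
--     for f in formulas:
--         if is_literal(f):
--             literals.add(f)
--     for lit in literals:
--         if lit.startswith('~') and lit[1:] in literals:
--             return True, literals
--         if ('~'+lit) in literals: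
--             return True, literals
--     return False, literals
-- ===== SOURCE B (Python) =====
-- def check_closed(formulas):
--     def atom(s):
--         if s in ('p', 'q', 'r', 's'):
--             return True
--         if len(s) >= 4 and s[0].isupper() and s[1] == '(' and s[-1] == ')':
--             return all(len(p) == 1 and p.islower() for p in s[2:-1].split(','))
--         return False
--
--     literals = set()
--     polarity = {}  # atom -> (positive seen, negative seen)
--     for f in formulas:
--         if f.startswith('~') and atom(f[1:]):
--             literals.add(f)
--             p, _ = polarity.get(f[1:], (False, False))
--             polarity[f[1:]] = (p, True)
--         elif atom(f):
--             literals.add(f)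
--             _, n = polarity.get(f, (False, False))
--             polarity[f] = (True, n)
--     return any(p and n for p, n in polarity.values()), literals
-- ===== Notes on version B (the rewrite author's own statement) =====
-- stated objective: faster
-- what changed: B makes a single pass that indexes each literal into a polarity table keyed by its stripped atom (atom -> (positive-seen, negative-seen) flags), so A's second loop over the literal set probing '~'+lit and lit[1:] for complements disappears, and A's recursive parse_prop/parse_fol machinery is replaced by a direct atom test; closure is read off as 'some table entry has both flags'.
import Mathlib
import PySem

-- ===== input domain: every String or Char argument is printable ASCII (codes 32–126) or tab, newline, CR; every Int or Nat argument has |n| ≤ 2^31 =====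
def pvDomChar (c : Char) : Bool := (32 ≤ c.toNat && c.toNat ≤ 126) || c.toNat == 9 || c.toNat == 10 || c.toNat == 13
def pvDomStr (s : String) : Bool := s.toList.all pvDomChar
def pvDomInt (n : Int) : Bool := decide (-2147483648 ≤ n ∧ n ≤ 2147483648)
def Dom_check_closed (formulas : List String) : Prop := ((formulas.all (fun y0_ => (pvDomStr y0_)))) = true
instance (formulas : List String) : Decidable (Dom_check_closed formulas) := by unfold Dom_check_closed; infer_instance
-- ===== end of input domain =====

-- B replaces A's two-stage scheme (recursive-parser literal collection, then a probe loop testing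
-- '~'+lit and lit[1:] against the set) by ONE pass that indexes every literal into a polarity
-- table keyed by its stripped atom; closure is read off as 'some table entry saw both polarities'.

-- ===== PORT A =====

def pvIsPropAtom (l : List Char) : Bool :=
  l == ['p'] || l == ['q'] || l == ['r'] || l == ['s']

def pvIsPredAtom (l : List Char) : Bool :=
  if l.length < 4 then false
  else
    match l with
    | c0 :: c1 :: _ =>
      if !(PySem.Chars.isupper c0) || c1 != '(' || l.getLast? != some ')' then false
      else
        -- args = fmla[2:-1]
        let args := (l.drop 2).dropLast
        if args.isEmpty then false
        else (PySem.Chars.splitOn args [',']).all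
               (fun p => p.length == 1 && (match p with | [c] => PySem.Chars.islower c | _ => false))
    | _ => false

def pvSbLoop (full : List Char) (level : Int) (i : Nat) : Option (List Char × List Char × List Char) :=
  if h : i < full.length then
    let ch := full[i]
    if ch = '(' then pvSbLoop full (level + 1) (i + 1)
    else if ch = ')' then pvSbLoop full (level - 1) (i + 1)
    else if level = 1 then
      if PySem.Chars.startswith (full.drop i) ['-', '>'] then
        some ((full.take i).drop 1, ['-', '>'], (full.drop (i + 2)).dropLast)
      else if PySem.Chars.startswith (full.drop i) ['\\', '/'] then
        some ((full.take i).drop 1, ['\\', '/'], (full.drop (i + 2)).dropLast)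
      else if ch = '&' then
        some ((full.take i).drop 1, ['&'], (full.drop (i + 1)).dropLast)
      else pvSbLoop full level (i + 1)
    else pvSbLoop full level (i + 1)
  else none
termination_by full.length - i

def pvSplitBinary (l : List Char) : Option (List Char × List Char × List Char) :=
  if l.length < 5 || l.head? != some '(' || l.getLast? != some ')' then none
  else pvSbLoop l 0 0

-- fuel = length of the formula: every recursive call of the Python is on a strictly shorter string
def pvParseProp : Nat → List Char → Int
  | 0, _ => 0
  | n + 1, l =>
    if pvIsPropAtom l then 6
    else if PySem.Chars.startswith l ['~'] then
      if pvParseProp n (l.drop 1) != 0 then 7 else 0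
    else
      match pvSplitBinary l with
      | some (left, _, right) =>
        if pvParseProp n left != 0 && pvParseProp n right != 0 then 8 else 0
      | none => 0

def pvParseFol : Nat → List Char → Int
  | 0, _ => 0
  | n + 1, l =>
    if pvIsPredAtom l then 1
    else if PySem.Chars.startswith l ['~'] then
      if pvParseFol n (l.drop 1) != 0 then 2 else 0
    else
      match l with
      | c0 :: c1 :: rest =>
        if (c0 == 'A' || c0 == 'E') && PySem.Chars.islower c1 then
          if rest.isEmpty then 0
          else if pvParseFol n rest != 0 then (if c0 == 'A' then 3 else 4)
          else
            match pvSplitBinary l with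
            | some (left, _, right) =>
              if pvParseFol n left != 0 && pvParseFol n right != 0 then 5 else 0
            | none => 0
        else
          match pvSplitBinary l with
          | some (left, _, right) =>
            if pvParseFol n left != 0 && pvParseFol n right != 0 then 5 else 0
          | none => 0
      | _ =>
        match pvSplitBinary l with
        | some (left, _, right) =>
          if pvParseFol n left != 0 && pvParseFol n right != 0 then 5 else 0
        | none => 0

def pvIsLiteral (f : String) : Bool :=
  if pvParseProp f.toList.length f.toList == 6 || pvParseFol f.toList.length f.toList == 1 then true
  else if PySem.Chars.startswith f.toList ['~'] then
    (pvParseProp (f.toList.drop 1).length (f.toList.drop 1) == 6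
      || pvParseFol (f.toList.drop 1).length (f.toList.drop 1) == 1)
  else false

def pvScan (lits : List String) (alls : List String) : Bool :=
  match lits with
  | [] => false
  | lit :: rest =>
    if PySem.Chars.startswith lit.toList ['~']
        && PySem.Set.contains alls (String.ofList (lit.toList.drop 1)) then true
    else if PySem.Set.contains alls (String.ofList ('~' :: lit.toList)) then true
    else pvScan rest alls

def check_closed (formulas : List String) : Bool × List String :=
  let literals := formulas.foldl (fun s f => if pvIsLiteral f then PySem.Set.add s f else s) PySem.Set.empty
  (pvScan literals literals, literals)

-- ===== PORT B =====

def pvPredAtomB (l : List Char) : Bool :=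
  4 ≤ l.length &&
    (match l with
     | c0 :: c1 :: _ =>
       PySem.Chars.isupper c0 && c1 == '(' && l.getLast? == some ')' &&
         (PySem.Chars.splitOn ((l.drop 2).dropLast) [',']).all
           (fun p => p.length == 1 && (match p with | [c] => PySem.Chars.islower c | _ => false))
     | _ => false)

def pvAtomB (l : List Char) : Bool :=
  l == ['p'] || l == ['q'] || l == ['r'] || l == ['s'] || pvPredAtomB l

-- one loop iteration of Source B: add the literal and set its polarity flag under the stripped atom
def pvStepB (st : List String × PySem.Dict String (Bool × Bool)) (f : String) :
    List String × PySem.Dict String (Bool × Bool) :=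
  if PySem.Chars.startswith f.toList ['~'] && pvAtomB (f.toList.drop 1) then
    let k := String.ofList (f.toList.drop 1)
    let pn := st.2.getD k (false, false)
    (PySem.Set.add st.1 f, st.2.insert k (pn.1, true))
  else if pvAtomB f.toList then
    let pn := st.2.getD f (false, false)
    (PySem.Set.add st.1 f, st.2.insert f (true, pn.2))
  else st

def check_closed_alt (formulas : List String) : Bool × List String :=
  let st := formulas.foldl pvStepB (PySem.Set.empty, PySem.Dict.empty)
  (st.2.values.any (fun pn => pn.1 && pn.2), st.1)

-- ===== PRECONDITION & SPEC =====
def Spec_check_closed (formulas : List String) (out : Bool × List String) : Prop := out = check_closed_alt formulas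
instance (formulas : List String) (out : Bool × List String) : Decidable (Spec_check_closed formulas out) := by unfold Spec_check_closed; infer_instance

-- ===== CLAIM (what is proved, stated in full; the proofs are below) =====
def Claim_equal_check_closed : Prop := ∀ (formulas : List String), Dom_check_closed formulas → Spec_check_closed formulas (check_closed formulas)

-- ===== LEMMAS AND PROOFS =====

def pvIsLitB (f : String) : Bool :=
  pvAtomB f.toList ||
    (PySem.Chars.startswith f.toList ['~'] && pvAtomB (f.toList.drop 1))

-- the polarity flags ('a' seen positively / '~a' seen) expressed directly on the input list
def pvPosB (fs : List String) (a : String) : Bool :=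
  pvAtomB a.toList && decide (a ∈ fs)
def pvNegB (fs : List String) (a : String) : Bool :=
  pvAtomB a.toList && decide (String.ofList ('~' :: a.toList) ∈ fs)

-- the dict component of one step, in isolation
def pvPolStepB (d : PySem.Dict String (Bool × Bool)) (f : String) : PySem.Dict String (Bool × Bool) :=
  if PySem.Chars.startswith f.toList ['~'] && pvAtomB (f.toList.drop 1) then
    let k := String.ofList (f.toList.drop 1)
    d.insert k ((d.getD k (false, false)).1, true)
  else if pvAtomB f.toList then
    d.insert f (true, (d.getD f (false, false)).2)
  else d

lemma parseProp_ne_six (n : Nat) (l : List Char) (hA : pvIsPropAtom l = false) :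
    pvParseProp (n + 1) l ≠ 6 := by
  simp only [pvParseProp, hA, Bool.false_eq_true, if_false]
  repeat' split
  all_goals omega

lemma parseProp_eq_six (n : Nat) (l : List Char) :
    (pvParseProp (n + 1) l = 6) ↔ pvIsPropAtom l = true := by
  cases hA : pvIsPropAtom l
  · simp [parseProp_ne_six n l hA]
  · simp [pvParseProp, hA]

lemma parseFol_ne_one (n : Nat) (l : List Char) (hA : pvIsPredAtom l = false) :
    pvParseFol (n + 1) l ≠ 1 := by
  simp only [pvParseFol, hA, Bool.false_eq_true, if_false]
  repeat' split
  all_goals omega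

lemma parseFol_eq_one (n : Nat) (l : List Char) :
    (pvParseFol (n + 1) l = 1) ↔ pvIsPredAtom l = true := by
  cases hA : pvIsPredAtom l
  · simp [parseFol_ne_one n l hA]
  · simp [pvParseFol, hA]

lemma all_splitOn_nil :
    (PySem.Chars.splitOn ([] : List Char) [',']).all
      (fun p => p.length == 1 && (match p with | [c] => PySem.Chars.islower c | _ => false)) = false := by
  decide

lemma predAtomB_eq (l : List Char) : pvPredAtomB l = pvIsPredAtom l := by
  rcases l with _ | ⟨c0, _ | ⟨c1, l2⟩⟩
  · rfl
  · rfl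
  · by_cases hlen : 2 ≤ l2.length
    · have h4 : ¬((c0 :: c1 :: l2).length < 4) := by
        simp only [List.length_cons]; omega
      have h4' : ¬(l2.length + 1 + 1 < 4) := by omega
      by_cases hu : PySem.Chars.isupper c0
      · by_cases hp : c1 = '('
        · subst hp
          by_cases hr : (('(' : Char) :: l2).getLast? = some ')'
          · by_cases hnil : l2.dropLast = []
            · simp [pvPredAtomB, pvIsPredAtom, hlen, h4', hu, hr, hnil, all_splitOn_nil]
            · simp [pvPredAtomB, pvIsPredAtom, hlen, h4', hu, hr, hnil]
          · simp [pvPredAtomB, pvIsPredAtom, hlen, h4', hu, hr]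
        · simp [pvPredAtomB, pvIsPredAtom, hlen, h4', hu, hp]
      · simp [pvPredAtomB, pvIsPredAtom, hlen, h4', hu]
    · have h4 : (c0 :: c1 :: l2).length < 4 := by
        simp only [List.length_cons]; omega
      have h4' : l2.length + 1 + 1 < 4 := by omega
      simp [pvPredAtomB, pvIsPredAtom, hlen, h4']

lemma atom_iff (l : List Char) :
    (pvParseProp l.length l == 6 || pvParseFol l.length l == 1) = pvAtomB l := by
  rw [Bool.eq_iff_iff]
  cases l with
  | nil => decide
  | cons c cs =>
    rw [List.length_cons, Bool.or_eq_true, beq_iff_eq, beq_iff_eq,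
        parseProp_eq_six, parseFol_eq_one, ← predAtomB_eq]
    simp only [pvAtomB, pvIsPropAtom, Bool.or_eq_true]

lemma isLiteral_eq (f : String) : pvIsLiteral f = pvIsLitB f := by
  simp only [pvIsLiteral, pvIsLitB, atom_iff]
  by_cases hA : pvAtomB f.toList
  · simp [hA]
  · by_cases ht : PySem.Chars.startswith f.toList ['~'] <;> simp [hA, ht]

lemma scan_any (lits alls : List String) :
    pvScan lits alls
      = lits.any (fun lit =>
          (PySem.Chars.startswith lit.toList ['~']
              && PySem.Set.contains alls (String.ofList (lit.toList.drop 1)))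
          || PySem.Set.contains alls (String.ofList ('~' :: lit.toList))) := by
  induction lits with
  | nil => rfl
  | cons lit rest ih =>
    simp only [pvScan, List.any_cons, ih]
    by_cases h1 : PySem.Chars.startswith lit.toList ['~']
        && PySem.Set.contains alls (String.ofList (lit.toList.drop 1)) <;>
      by_cases h2 : PySem.Set.contains alls (String.ofList ('~' :: lit.toList)) <;>
      simp [h1, h2, Bool.or_assoc]

lemma startswith_tilde_cons (c : Char) (t : List Char) :
    PySem.Chars.startswith (c :: t) ['~'] = decide (c = '~') := by
  rw [Bool.eq_iff_iff, PySem.Chars.startswith_iff, List.cons_prefix_cons]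
  constructor
  · rintro ⟨h1, -⟩
    exact decide_eq_true h1.symm
  · intro h
    exact ⟨(of_decide_eq_true h).symm, List.nil_prefix⟩

lemma tilde_shape {l : List Char} (h : PySem.Chars.startswith l ['~'] = true) :
    l = '~' :: l.drop 1 := by
  rw [PySem.Chars.startswith_iff] at h
  obtain ⟨t, rfl⟩ := h
  rfl

lemma atomB_not_tilde (l : List Char) (h : pvAtomB l = true) :
    PySem.Chars.startswith l ['~'] = false := by
  rcases l with _ | ⟨c0, l'⟩
  · exact absurd h (by decide)
  · rw [startswith_tilde_cons]
    simp only [pvAtomB, Bool.or_eq_true, beq_iff_eq] at h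
    rcases h with (((h | h) | h) | h) | h
    · simp only [List.cons.injEq] at h
      simp [h.1]
    · simp only [List.cons.injEq] at h
      simp [h.1]
    · simp only [List.cons.injEq] at h
      simp [h.1]
    · simp only [List.cons.injEq] at h
      simp [h.1]
    · -- predicate atom: first character is uppercase, '~' is not
      rcases l' with _ | ⟨c1, l2⟩
      · exact absurd h (by simp [pvPredAtomB])
      · simp only [pvPredAtomB, Bool.and_eq_true] at h
        obtain ⟨-, ⟨⟨⟨hu, -⟩, -⟩, -⟩⟩ := h
        have hne : c0 ≠ '~' := by
          intro hc; rw [hc] at hu; exact absurd hu (by decide)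
        simp [hne]

lemma tilde_not_atomB (l : List Char) (h : PySem.Chars.startswith l ['~'] = true) :
    pvAtomB l = false := by
  cases hA : pvAtomB l
  · rfl
  · rw [atomB_not_tilde l hA] at h; exact absurd h (by simp)

-- the two components of the combined fold evolve independently
lemma stepB_fst (st : List String × PySem.Dict String (Bool × Bool)) (f : String) :
    (pvStepB st f).1 = if pvIsLitB f then PySem.Set.add st.1 f else st.1 := by
  unfold pvStepB pvIsLitB
  cases ht : PySem.Chars.startswith f.toList ['~'] <;>
    cases ha : pvAtomB (f.toList.drop 1) <;>
    cases h2 : pvAtomB f.toList <;>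
    simp [ht, ha, h2]

lemma stepB_snd (st : List String × PySem.Dict String (Bool × Bool)) (f : String) :
    (pvStepB st f).2 = pvPolStepB st.2 f := by
  unfold pvStepB pvPolStepB
  split_ifs <;> rfl

lemma foldB_split (fs : List String) (s : List String) (d : PySem.Dict String (Bool × Bool)) :
    fs.foldl pvStepB (s, d)
      = (fs.foldl (fun s f => if pvIsLitB f then PySem.Set.add s f else s) s,
         fs.foldl pvPolStepB d) := by
  induction fs generalizing s d with
  | nil => rfl
  | cons f rest ih =>
    simp only [List.foldl_cons]
    rw [← Prod.eta (pvStepB (s, d) f), ih, stepB_fst, stepB_snd]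

lemma foldl_add_filter (p : String → Bool) (fs : List String) (s : PySem.Set String) :
    fs.foldl (fun s f => if p f then PySem.Set.add s f else s) s
      = (fs.filter p).foldl PySem.Set.add s := by
  induction fs generalizing s with
  | nil => rfl
  | cons f fs ih =>
    by_cases h : p f <;> simp [h, ih]

lemma posB_cons (f : String) (rest : List String) (a : String) :
    pvPosB (f :: rest) a = ((pvAtomB a.toList && f == a) || pvPosB rest a) := by
  rw [Bool.eq_iff_iff]
  simp only [pvPosB, Bool.and_eq_true, Bool.or_eq_true, decide_eq_true_eq, List.mem_cons,
    beq_iff_eq]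
  constructor
  · rintro ⟨hA, h | h⟩
    · exact Or.inl ⟨hA, h.symm⟩
    · exact Or.inr ⟨hA, h⟩
  · rintro (⟨hA, h⟩ | ⟨hA, h⟩)
    · exact ⟨hA, Or.inl h.symm⟩
    · exact ⟨hA, Or.inr h⟩

lemma negB_cons (f : String) (rest : List String) (a : String) :
    pvNegB (f :: rest) a
      = ((pvAtomB a.toList && f == String.ofList ('~' :: a.toList)) || pvNegB rest a) := by
  rw [Bool.eq_iff_iff]
  simp only [pvNegB, Bool.and_eq_true, Bool.or_eq_true, decide_eq_true_eq, List.mem_cons,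
    beq_iff_eq]
  constructor
  · rintro ⟨hA, h | h⟩
    · exact Or.inl ⟨hA, h.symm⟩
    · exact Or.inr ⟨hA, h⟩
  · rintro (⟨hA, h⟩ | ⟨hA, h⟩)
    · exact ⟨hA, Or.inl h.symm⟩
    · exact ⟨hA, Or.inr h⟩

-- one step of the polarity dict, characterised pointwise
lemma polStep_get? (d : PySem.Dict String (Bool × Bool)) (f a : String) :
    (pvPolStepB d f).get? a
      = if (pvAtomB a.toList && f == a) || (pvAtomB a.toList && f == String.ofList ('~' :: a.toList))
        then some ((d.getD a (false, false)).1 || (pvAtomB a.toList && f == a),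
                   (d.getD a (false, false)).2 || (pvAtomB a.toList && f == String.ofList ('~' :: a.toList)))
        else d.get? a := by
  by_cases hbr : (PySem.Chars.startswith f.toList ['~'] && pvAtomB (f.toList.drop 1)) = true
  · have ht : PySem.Chars.startswith f.toList ['~'] = true := by
      rw [Bool.and_eq_true] at hbr; exact hbr.1
    have hk : pvAtomB (f.toList.drop 1) = true := by
      rw [Bool.and_eq_true] at hbr; exact hbr.2
    have hsh : f.toList = '~' :: f.toList.drop 1 := tilde_shape ht
    have hEQ1 : (pvAtomB a.toList && f == a) = false := by
      cases hc : f == a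
      · simp
      · rw [beq_iff_eq] at hc
        rw [← hc, tilde_not_atomB _ ht, Bool.false_and]
    have hkey : ∀ x : String,
        (f == String.ofList ('~' :: x.toList)) = true ↔ x = String.ofList (f.toList.drop 1) := by
      intro x
      rw [beq_iff_eq]
      constructor
      · intro hfx
        have hfl : f.toList = '~' :: x.toList := by rw [hfx, String.toList_ofList]
        have hx : x.toList = f.toList.drop 1 := by rw [hfl]; rfl
        rw [← hx, String.ofList_toList]
      · intro hx
        subst hx
        rw [String.toList_ofList, ← hsh, String.ofList_toList]
    unfold pvPolStepB
    rw [if_pos hbr, PySem.Dict.get?_insert]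
    by_cases ha : a = String.ofList (f.toList.drop 1)
    · subst ha
      have hatom : pvAtomB (String.ofList (f.toList.drop 1)).toList = true := by
        rw [String.toList_ofList]; exact hk
      have hf2 : (f == String.ofList ('~' :: (String.ofList (f.toList.drop 1)).toList)) = true :=
        (hkey _).mpr rfl
      have hfk : (f == String.ofList (f.toList.drop 1)) = false := by
        cases hc : f == String.ofList (f.toList.drop 1)
        · rfl
        · exfalso
          rw [beq_iff_eq] at hc
          have hlen := congrArg (fun s => s.toList.length) hc
          simp only [String.toList_ofList] at hlen
          rw [hsh] at hlen
          simp at hlen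
      rw [if_pos rfl]
      simp only [List.drop_one, String.toList_ofList] at hatom hf2 hfk
      simp [hfk, hatom, hf2]
    · have hf2 : (f == String.ofList ('~' :: a.toList)) = false := by
        cases hc : f == String.ofList ('~' :: a.toList)
        · rfl
        · exact absurd ((hkey a).mp hc) ha
      rw [if_neg ha]
      simp only [hEQ1, hf2, Bool.and_false, Bool.or_false, Bool.false_eq_true, if_false]
  · have hneg : ∀ x : String, pvAtomB x.toList = true → (f == String.ofList ('~' :: x.toList)) = false := by
      intro x hx
      cases hc : f == String.ofList ('~' :: x.toList)
      · rfl
      · exfalso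
        have hfl : f.toList = '~' :: x.toList := by
          rw [beq_iff_eq] at hc; rw [hc, String.toList_ofList]
        have ht : PySem.Chars.startswith f.toList ['~'] = true := by
          rw [hfl, startswith_tilde_cons]; decide
        have hd : pvAtomB (f.toList.drop 1) = true := by rw [hfl]; exact hx
        exact hbr (by rw [ht, hd]; rfl)
    have hEQ2 : (pvAtomB a.toList && f == String.ofList ('~' :: a.toList)) = false := by
      cases hA : pvAtomB a.toList
      · simp
      · rw [hneg a hA, Bool.and_false]
    by_cases h2 : pvAtomB f.toList = true
    · unfold pvPolStepB
      rw [if_neg hbr, if_pos h2, PySem.Dict.get?_insert]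
      by_cases ha : a = f
      · subst ha
        have hx : (a == String.ofList ('~' :: a.toList)) = false := hneg a h2
        rw [if_pos rfl]
        simp [h2, hx]
      · have hf1 : (pvAtomB a.toList && f == a) = false := by
          have : (f == a) = false := by
            cases hc : f == a
            · rfl
            · rw [beq_iff_eq] at hc; exact absurd hc.symm ha
          rw [this, Bool.and_false]
        rw [if_neg ha]
        simp only [hf1, hEQ2, Bool.or_false, Bool.false_eq_true, if_false]
    · have hEQ1 : (pvAtomB a.toList && f == a) = false := by
        cases hc : f == a
        · simp
        · rw [beq_iff_eq] at hc
          rw [← hc, Bool.eq_false_iff.mpr h2, Bool.false_and]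
      unfold pvPolStepB
      rw [if_neg hbr, if_neg h2]
      simp only [hEQ1, hEQ2, Bool.or_false, Bool.false_eq_true, if_false]

lemma polStep_getD (d : PySem.Dict String (Bool × Bool)) (f a : String) :
    (pvPolStepB d f).getD a (false, false)
      = ((d.getD a (false, false)).1 || (pvAtomB a.toList && f == a),
         (d.getD a (false, false)).2 || (pvAtomB a.toList && f == String.ofList ('~' :: a.toList))) := by
  rw [PySem.Dict.getD_eq_get?_getD, polStep_get? d f a]
  split
  · rfl
  · next h =>
    rw [Bool.or_eq_true, not_or] at h
    obtain ⟨h1, h2⟩ := h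
    rw [Bool.not_eq_true] at h1 h2
    rw [h1, h2, Bool.or_false, Bool.or_false, ← PySem.Dict.getD_eq_get?_getD]

-- invariant of the whole polarity-building fold
lemma polFold_get? (fs : List String) (d : PySem.Dict String (Bool × Bool)) (a : String) :
    (fs.foldl pvPolStepB d).get? a
      = if pvPosB fs a || pvNegB fs a
        then some ((d.getD a (false, false)).1 || pvPosB fs a,
                   (d.getD a (false, false)).2 || pvNegB fs a)
        else d.get? a := by
  induction fs generalizing d with
  | nil => simp [pvPosB, pvNegB]
  | cons f rest ih =>
    simp only [List.foldl_cons, ih (pvPolStepB d f), polStep_getD, posB_cons, negB_cons]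
    by_cases hR : pvPosB rest a || pvNegB rest a
    · have : ((pvAtomB a.toList && f == a || pvPosB rest a)
          || (pvAtomB a.toList && f == String.ofList ('~' :: a.toList) || pvNegB rest a)) = true := by
        rw [Bool.or_eq_true] at hR ⊢
        rcases hR with h | h
        · exact Or.inl (by simp [h])
        · exact Or.inr (by simp [h])
      simp only [hR, if_true, this, if_true, Bool.or_assoc]
    · have hp : pvPosB rest a = false := by
        cases h : pvPosB rest a
        · rfl
        · exact absurd (by simp [h]) hR
      have hn : pvNegB rest a = false := by
        cases h : pvNegB rest a
        · rfl
        · exact absurd (by simp [h]) hR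
      rw [hp, hn, polStep_get? d f a]
      simp only [Bool.or_false, Bool.false_eq_true, if_false]

lemma polFold_nodup (fs : List String) (d : PySem.Dict String (Bool × Bool))
    (hd : d.keys.Nodup) : (fs.foldl pvPolStepB d).keys.Nodup := by
  induction fs generalizing d with
  | nil => exact hd
  | cons f rest ih =>
    refine ih (pvPolStepB d f) ?_
    unfold pvPolStepB
    split
    · exact PySem.Dict.nodup_keys_insert _ _ _ hd
    · split
      · exact PySem.Dict.nodup_keys_insert _ _ _ hd
      · exact hd

-- the closure bit read from the polarity table = 'some atom occurs in both polarities'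
lemma values_any_iff (fs : List String) :
    ((fs.foldl pvPolStepB PySem.Dict.empty).values.any (fun pn => pn.1 && pn.2)) = true
      ↔ ∃ a : String, pvPosB fs a = true ∧ pvNegB fs a = true := by
  have hnd : (fs.foldl pvPolStepB PySem.Dict.empty).keys.Nodup :=
    polFold_nodup fs _ PySem.Dict.nodup_keys_empty
  have hget : ∀ a, (fs.foldl pvPolStepB PySem.Dict.empty).get? a
      = if pvPosB fs a || pvNegB fs a then some (pvPosB fs a, pvNegB fs a) else none := by
    intro a
    rw [polFold_get? fs PySem.Dict.empty a, PySem.Dict.getD_empty, PySem.Dict.get?_empty]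
    simp
  constructor
  · intro h
    rw [List.any_eq_true] at h
    obtain ⟨v, hv, hval⟩ := h
    simp only [PySem.Dict.values, List.mem_map] at hv
    obtain ⟨kv, hkv, hsnd⟩ := hv
    have hkv' : (kv.1, kv.2) ∈ (fs.foldl pvPolStepB PySem.Dict.empty).items := by
      rw [kv.eta]; exact hkv
    have hg := PySem.Dict.get?_of_mem_items _ hkv' hnd
    rw [hget kv.1] at hg
    split at hg
    · rw [hsnd] at hg
      have := (Option.some.injEq ..) ▸ hg
      refine ⟨kv.1, ?_, ?_⟩
      · have h1 := congrArg Prod.fst this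
        simp only at h1
        rw [Bool.and_eq_true] at hval
        rw [h1]; exact hval.1
      · have h2 := congrArg Prod.snd this
        simp only at h2
        rw [Bool.and_eq_true] at hval
        rw [h2]; exact hval.2
    · exact absurd hg (by simp)
  · rintro ⟨a, hp, hn⟩
    have hg : (fs.foldl pvPolStepB PySem.Dict.empty).get? a = some (true, true) := by
      rw [hget a, hp, hn]; rfl
    have hmem := PySem.Dict.mem_items_of_get?_eq_some _ hg
    rw [List.any_eq_true]
    refine ⟨(true, true), ?_, rfl⟩
    simp only [PySem.Dict.values, List.mem_map]
    exact ⟨(a, (true, true)), hmem, rfl⟩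

lemma mem_ofList_filter (fs : List String) (x : String) :
    x ∈ PySem.Set.ofList (fs.filter pvIsLitB) ↔ x ∈ fs ∧ pvIsLitB x = true := by
  rw [PySem.Set.mem_ofList, List.mem_filter]

-- A's probe loop over the literal set = 'some atom occurs in both polarities'
lemma scanA_iff (fs : List String) :
    (PySem.Set.ofList (fs.filter pvIsLitB)).any (fun lit =>
        (PySem.Chars.startswith lit.toList ['~']
            && PySem.Set.contains (PySem.Set.ofList (fs.filter pvIsLitB)) (String.ofList (lit.toList.drop 1)))
        || PySem.Set.contains (PySem.Set.ofList (fs.filter pvIsLitB)) (String.ofList ('~' :: lit.toList))) = true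
      ↔ ∃ a : String, pvPosB fs a = true ∧ pvNegB fs a = true := by
  rw [List.any_eq_true]
  constructor
  · rintro ⟨lit, hmem, hp⟩
    obtain ⟨hlfs, hlit⟩ := (mem_ofList_filter fs lit).mp hmem
    rw [Bool.or_eq_true] at hp
    rcases hp with hc | hc
    · rw [Bool.and_eq_true] at hc
      obtain ⟨ht, hcont⟩ := hc
      rw [PySem.Set.contains_iff, mem_ofList_filter] at hcont
      have hatom : pvAtomB (lit.toList.drop 1) = true := by
        simp only [pvIsLitB, Bool.or_eq_true, Bool.and_eq_true] at hlit
        rcases hlit with h1 | ⟨-, h2⟩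
        · rw [tilde_not_atomB _ ht] at h1; exact absurd h1 (by simp)
        · exact h2
      refine ⟨String.ofList (lit.toList.drop 1), ?_, ?_⟩
      · simp only [pvPosB, String.toList_ofList, hatom, Bool.true_and, decide_eq_true_eq]
        exact hcont.1
      · simp only [pvNegB, String.toList_ofList, hatom, Bool.true_and, decide_eq_true_eq]
        rw [← tilde_shape ht, String.ofList_toList]
        exact hlfs
    · rw [PySem.Set.contains_iff, mem_ofList_filter] at hc
      have hty : PySem.Chars.startswith (String.ofList ('~' :: lit.toList)).toList ['~'] = true := by
        rw [String.toList_ofList, startswith_tilde_cons]; decide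
      have hatom : pvAtomB lit.toList = true := by
        have hyB := hc.2
        simp only [pvIsLitB, Bool.or_eq_true, Bool.and_eq_true] at hyB
        rcases hyB with h1 | ⟨-, h2⟩
        · rw [tilde_not_atomB _ hty] at h1; exact absurd h1 (by simp)
        · simpa using h2
      refine ⟨lit, ?_, ?_⟩
      · simp only [pvPosB, hatom, Bool.true_and, decide_eq_true_eq]
        exact hlfs
      · simp only [pvNegB, hatom, Bool.true_and, decide_eq_true_eq]
        exact hc.1
  · rintro ⟨a, hp, hn⟩
    simp only [pvPosB, Bool.and_eq_true, decide_eq_true_eq] at hp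
    simp only [pvNegB, Bool.and_eq_true, decide_eq_true_eq] at hn
    obtain ⟨hatom, hafs⟩ := hp
    have halit : pvIsLitB a = true := by
      simp only [pvIsLitB, Bool.or_eq_true]; exact Or.inl hatom
    have hnlit : pvIsLitB (String.ofList ('~' :: a.toList)) = true := by
      simp only [pvIsLitB, Bool.or_eq_true, Bool.and_eq_true]
      refine Or.inr ⟨?_, ?_⟩
      · rw [String.toList_ofList, startswith_tilde_cons]; decide
      · rw [String.toList_ofList]; simpa using hatom
    refine ⟨a, (mem_ofList_filter fs a).mpr ⟨hafs, halit⟩, ?_⟩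
    rw [Bool.or_eq_true]
    refine Or.inr ?_
    rw [PySem.Set.contains_iff, mem_ofList_filter]
    exact ⟨hn.2, hnlit⟩

-- ===== VERDICT (by name: the statement is the Claim_ definition above) =====
theorem check_closed_spec : Claim_equal_check_closed := by
  intro formulas _
  unfold Spec_check_closed check_closed check_closed_alt
  rw [foldB_split]
  have hlit : formulas.foldl (fun s f => if pvIsLiteral f then PySem.Set.add s f else s)
        PySem.Set.empty
      = PySem.Set.ofList (formulas.filter pvIsLitB) := by
    have h1 : formulas.filter pvIsLiteral = formulas.filter pvIsLitB :=
      List.filter_congr (fun x _ => by rw [isLiteral_eq])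
    rw [foldl_add_filter, h1, PySem.Set.ofList_eq_foldl]
    rfl
  have hlit' : formulas.foldl (fun s f => if pvIsLitB f then PySem.Set.add s f else s)
        PySem.Set.empty
      = PySem.Set.ofList (formulas.filter pvIsLitB) := by
    rw [foldl_add_filter, PySem.Set.ofList_eq_foldl]
    rfl
  simp only [hlit, hlit']
  refine Prod.ext ?_ rfl
  simp only
  rw [scan_any, Bool.eq_iff_iff, scanA_iff formulas, ← values_any_iff formulas]
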